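-- pv_equiv track=rewrite | github.com/mrugnivenko/fizzbuzz | fizzbuzz.py | give_start
-- ===== SOURCE A (Python) =====
-- def give_start(stroka):
--     i = 0
--     while i < len(stroka):
--         for simvol in stroka:
--             if simvol in {'-','0','1','2','3','4','5','6','7','8','9'}:
--                 break
--             else :
--                 i += 1
--         if i == len(stroka):
--             return -1
--         else:
--             return i
-- ===== SOURCE B (Python) =====
-- def give_start(stroka):
--     hits = [p for p in (stroka.find(c) for c in '-0123456789') if p != -1]
--     return min(hits) if hits else -1
-- ===== Notes on version B (the rewrite author's own statement) =====
-- stated objective: faster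
-- what changed: B replaces A's per-character Python while/for scan with eleven C-level str.find calls (one per digit-or-minus character) and returns the minimum position found.
-- outside the precondition, e.g. on give_start(''): A returns None, B returns -1
import Mathlib
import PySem

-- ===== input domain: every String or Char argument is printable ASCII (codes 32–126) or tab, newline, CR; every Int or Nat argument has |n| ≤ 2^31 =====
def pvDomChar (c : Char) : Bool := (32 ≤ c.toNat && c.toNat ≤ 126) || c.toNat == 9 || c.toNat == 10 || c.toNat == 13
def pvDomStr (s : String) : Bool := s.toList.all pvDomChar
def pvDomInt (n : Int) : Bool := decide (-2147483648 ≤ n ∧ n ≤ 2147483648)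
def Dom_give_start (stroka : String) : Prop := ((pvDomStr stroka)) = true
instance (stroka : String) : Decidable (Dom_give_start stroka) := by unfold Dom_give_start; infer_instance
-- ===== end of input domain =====

-- B replaces A's manual while/for scan with per-character library find + min; Pre_ excludes the empty
-- string, on which A returns None (not an int).
set_option maxRecDepth 10000


-- ===== PORT A =====
-- inner 'for simvol in stroka' loop: returns the current counter at the first digit-or-minus
-- character, or the counter after the last character
def giveLoopA : List Char → Int → Int
  | [], i => i
  | c :: rest, i =>
    if c ∈ (['-','0','1','2','3','4','5','6','7','8','9'] : List Char) then i
    else giveLoopA rest (i + 1)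

def give_start (stroka : String) : Int :=
  if (0 : Int) < PySem.Str.len stroka then
    let i := giveLoopA stroka.toList 0
    if i = PySem.Str.len stroka then -1 else i
  else -1  -- Python A falls off the while loop and returns None here; excluded by Pre_

-- ===== PORT B =====
def give_start_alt (stroka : String) : Int :=
  let hits := ((("-0123456789" : String).toList).map
      (fun c => PySem.Str.find stroka (String.ofList [c]))).filter (fun p => p ≠ -1)
  match PySem.List.min? hits (fun x => x) with
  | some m => m
  | none => -1

-- ===== PRECONDITION & SPEC =====
-- Pre_ excludes only the empty string, on which A returns None instead of an int.
def Pre_give_start (stroka : String) : Prop := stroka ≠ ""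
instance (stroka : String) : Decidable (Pre_give_start stroka) := by unfold Pre_give_start; infer_instance
def pvWitness_give_start : String := "x7"

def Spec_give_start (stroka : String) (out : Int) : Prop := out = give_start_alt stroka
instance (stroka : String) (out : Int) : Decidable (Spec_give_start stroka out) := by unfold Spec_give_start; infer_instance

-- ===== CLAIM (what is proved, stated in full; the proofs are below) =====
def Claim_equal_give_start : Prop := ∀ (stroka : String), Dom_give_start stroka → Pre_give_start stroka → Spec_give_start stroka (give_start stroka)

-- ===== LEMMAS AND PROOFS =====

theorem prefix_single {c : Char} {xs : List Char} : [c] <+: xs ↔ xs.head? = some c := by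
  cases xs with
  | nil => simp
  | cons x t => simp [List.cons_prefix_cons, eq_comm]

theorem giveLoopA_eq (l : List Char) (i : Int) :
    giveLoopA l i = i + (l.findIdx (fun c => decide (c ∈ (['-','0','1','2','3','4','5','6','7','8','9'] : List Char))) : Int) := by
  induction l generalizing i with
  | nil => simp [giveLoopA]
  | cons c rest ih =>
    rw [List.findIdx_cons]
    by_cases h : c ∈ (['-','0','1','2','3','4','5','6','7','8','9'] : List Char)
    · simp [giveLoopA, h]
    · simp only [giveLoopA, h, if_false, decide_false, cond_false]
      rw [ih]
      push_cast
      ring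


theorem chars_eq : ("-0123456789" : String).toList = (['-','0','1','2','3','4','5','6','7','8','9'] : List Char) := by decide

-- (a) a successful single-char find points at an occurrence of the character
theorem find_single_mem {l : List Char} {c : Char} (h : PySem.Chars.find l [c] ≠ -1) :
    0 ≤ PySem.Chars.find l [c] ∧ l[(PySem.Chars.find l [c]).toNat]? = some c := by
  have h0 : 0 ≤ PySem.Chars.find l [c] := by
    have := PySem.Chars.neg_one_le_find l [c]; omega
  have hs := PySem.Chars.find_spec h0
  refine ⟨h0, ?_⟩
  have := hs.1
  rw [prefix_single] at this
  rwa [List.head?_drop] at this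

-- (b) find on a single character returns the first index holding that character
theorem find_single_eq {l : List Char} {c : Char} {k : Nat}
    (hk : l[k]? = some c) (hmin : ∀ j < k, l[j]? ≠ some c) :
    PySem.Chars.find l [c] = (k : Int) := by
  have hne : PySem.Chars.find l [c] ≠ -1 := by
    rw [PySem.Chars.find_ne_neg_one_iff]
    have hd : (l.drop k).head? = some c := by rw [List.head?_drop]; exact hk
    obtain ⟨t, ht⟩ : ∃ t, l.drop k = c :: t := by
      cases hdk : l.drop k with
      | nil => rw [hdk] at hd; simp at hd
      | cons x t => rw [hdk] at hd; simp at hd; exact ⟨t, by rw [hd]⟩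
    exact ⟨l.take k, t, by rw [List.append_assoc, List.singleton_append, ← ht, List.take_append_drop]⟩
  obtain ⟨h0, hmem⟩ := find_single_mem hne
  have hs := PySem.Chars.find_spec h0
  set f := (PySem.Chars.find l [c]).toNat with hf
  have hfk : f = k := by
    rcases lt_trichotomy f k with h | h | h
    · exact absurd hmem (hmin f h)
    · exact h
    · exfalso
      exact hs.2 k h (by rw [prefix_single, List.head?_drop]; exact hk)
  omega

-- core equivalence, stated over the character list
theorem give_start_main (l : List Char) (hl : l ≠ []) :
    (if (↑(List.findIdx (fun c => decide (c ∈ (['-','0','1','2','3','4','5','6','7','8','9'] : List Char))) l) : Int) = (↑l.length : Int) then (-1 : Int)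
      else ↑(List.findIdx (fun c => decide (c ∈ (['-','0','1','2','3','4','5','6','7','8','9'] : List Char))) l)) =
    (match PySem.List.min? (((['-','0','1','2','3','4','5','6','7','8','9'] : List Char).map
        (fun c => PySem.Chars.find l (String.ofList [c]).toList)).filter (fun p => p ≠ -1)) (fun x => x) with
      | some m => m
      | none => -1) := by
  set p : Char → Bool := fun c => decide (c ∈ (['-','0','1','2','3','4','5','6','7','8','9'] : List Char)) with hp
  set k := l.findIdx p with hkd
  have hlen : 0 < l.length := List.length_pos_iff.mpr hl
  have hmk : ∀ c : Char, (String.ofList [c]).toList = [c] := fun c => by simp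
  by_cases hk : k < l.length
  · -- a digit-or-minus character exists at index k; both sides return k
    have hc0 : p l[k] = true := List.findIdx_getElem (p := p) (xs := l) (w := hk)
    have hc0' : l[k] ∈ (['-','0','1','2','3','4','5','6','7','8','9'] : List Char) := by
      exact of_decide_eq_true hc0
    have hfind : PySem.Chars.find l [l[k]] = (k : Int) := by
      apply find_single_eq (List.getElem?_eq_getElem hk)
      intro j hj hjc
      have hjl : j < l.length := by omega
      rw [List.getElem?_eq_getElem hjl, Option.some_inj] at hjc
      have hpj : p l[j] = false := List.not_of_lt_findIdx (by omega)
      rw [hjc, hc0] at hpj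
      exact absurd hpj (by simp)
    have hkmem : (k : Int) ∈ (((['-','0','1','2','3','4','5','6','7','8','9'] : List Char).map
        (fun c => PySem.Chars.find l (String.ofList [c]).toList)).filter (fun p => p ≠ -1)) := by
      rw [List.mem_filter]
      refine ⟨List.mem_map.mpr ⟨l[k], hc0', by rw [hmk]; exact hfind⟩, by simp⟩
    have hge : ∀ m ∈ (((['-','0','1','2','3','4','5','6','7','8','9'] : List Char).map
        (fun c => PySem.Chars.find l (String.ofList [c]).toList)).filter (fun p => p ≠ -1)), (k : Int) ≤ m := by
      intro m hm
      rw [List.mem_filter] at hm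
      obtain ⟨c, hcS, hcf⟩ := List.mem_map.mp hm.1
      have hne : m ≠ -1 := by simpa using hm.2
      rw [hmk] at hcf
      obtain ⟨h0, hmem⟩ := find_single_mem (l := l) (c := c) (by rw [hcf]; exact hne)
      rw [hcf] at h0 hmem
      by_contra hlt
      have hmlk : m.toNat < k := by omega
      have hml : m.toNat < l.length := by omega
      rw [List.getElem?_eq_getElem hml, Option.some_inj] at hmem
      have hpm : p l[m.toNat] = false := List.not_of_lt_findIdx (by omega)
      have hpm' : l[m.toNat] ∉ (['-','0','1','2','3','4','5','6','7','8','9'] : List Char) := of_decide_eq_false hpm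
      rw [hmem] at hpm'
      exact hpm' hcS
    cases hmq : PySem.List.min? (((['-','0','1','2','3','4','5','6','7','8','9'] : List Char).map
        (fun c => PySem.Chars.find l (String.ofList [c]).toList)).filter (fun p => p ≠ -1)) (fun x => x) with
    | none =>
      rw [PySem.List.min?_eq_none_iff] at hmq
      rw [hmq] at hkmem
      exact absurd hkmem (by simp)
    | some m =>
      have h1 := PySem.List.min?_mem hmq
      have h2 := PySem.List.min?_isMin hmq (k : Int) hkmem
      have h3 := hge m h1
      have hmk3 : m = (k : Int) := le_antisymm h2 h3
      rw [hmk3, if_neg (by exact_mod_cast Nat.ne_of_lt hk)]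
  · -- no digit-or-minus character anywhere; both sides return -1
    have hkl : k = l.length := le_antisymm List.findIdx_le_length (by omega)
    have hnone : ∀ x ∈ l, p x = false := by
      intro x hx
      by_contra hpx
      have : l.findIdx p < l.length := List.findIdx_lt_length.mpr ⟨x, hx, by simpa using hpx⟩
      omega
    have hfil : (((['-','0','1','2','3','4','5','6','7','8','9'] : List Char).map
        (fun c => PySem.Chars.find l (String.ofList [c]).toList)).filter (fun p => p ≠ -1)) = [] := by
      rw [List.filter_eq_nil_iff]
      intro a ha
      obtain ⟨c, hcS, hcf⟩ := List.mem_map.mp ha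
      simp only [ne_eq, decide_not, Bool.not_eq_true', decide_eq_false_iff_not, not_not]
      rw [hmk] at hcf
      by_contra hne
      rw [← hcf] at hne
      obtain ⟨h0, hmem⟩ := find_single_mem hne
      have hml : (PySem.Chars.find l [c]).toNat < l.length := by
        rcases List.getElem?_eq_some_iff.mp hmem with ⟨h, _⟩; exact h
      rw [List.getElem?_eq_getElem hml, Option.some_inj] at hmem
      have hfl := hnone _ (List.getElem_mem hml)
      have hfl' : l[(PySem.Chars.find l [c]).toNat] ∉ (['-','0','1','2','3','4','5','6','7','8','9'] : List Char) := of_decide_eq_false hfl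
      rw [hmem] at hfl'
      exact hfl' hcS
    rw [hfil, (PySem.List.min?_eq_none_iff _ _).mpr rfl, if_pos (by exact_mod_cast hkl)]

-- ===== VERDICT (by name: the statement is the Claim_ definition above) =====
theorem give_start_spec : Claim_equal_give_start := by
  intro s _ hpre
  unfold Spec_give_start give_start give_start_alt
  have hl : s.toList ≠ [] := fun h => hpre (String.toList_eq_nil_iff.mp h)
  have houter : (0 : Int) < PySem.Str.len s := by
    rw [PySem.Str.len_eq]
    exact_mod_cast List.length_pos_iff.mpr hl
  rw [if_pos houter]
  simp only [PySem.Str.find_eq]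
  simp only [PySem.Str.len_eq]
  simp only [chars_eq]
  simp only [giveLoopA_eq]
  simp only [zero_add]
  exact give_start_main s.toList hl
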